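-- pv_equiv track=rewrite | github.com/nlp-vgqm/hub-tnno | 王波/week13/evaluate.py | decode_entities
-- ===== SOURCE A (Python) =====
-- from collections import defaultdict
--
-- def decode_entities(tokens, labels):
--     """
--     从对齐的tokens和labels解码实体
--     """
--     # 标签映射关系
--     # 0:B-PER, 1:B-LOC, 2:B-ORG, 3:B-TIME
--     # 4:I-PER, 5:I-LOC, 6:I-ORG, 7:I-TIME
--     # 8:O
--
--     results = defaultdict(list)
--
--     i = 0
--     while i < len(labels):
--         label = labels[i]
--
--         if label < 8:  # 实体标签
--             entity_type = ""
--             entity_tokens = []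
--
--             # 确定实体类型
--             if label == 0 or label == 4:
--                 entity_type = "PERSON"
--             elif label == 1 or label == 5:
--                 entity_type = "LOCATION"
--             elif label == 2 or label == 6:
--                 entity_type = "ORGANIZATION"
--             elif label == 3 or label == 7:
--                 entity_type = "TIME"
--
--             # 开始收集实体tokens
--             while i < len(labels):
--                 current_label = labels[i]
--
--                 # 检查是否属于同一实体类型
--                 is_same_entity = (
--                         (current_label == 0 and entity_type == "PERSON") or
--                         (current_label == 1 and entity_type == "LOCATION") or
--                         (current_label == 2 and entity_type == "ORGANIZATION") or
--                         (current_label == 3 and entity_type == "TIME") or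
--                         (current_label == 4 and entity_type == "PERSON") or
--                         (current_label == 5 and entity_type == "LOCATION") or
--                         (current_label == 6 and entity_type == "ORGANIZATION") or
--                         (current_label == 7 and entity_type == "TIME")
--                 )
--
--                 if is_same_entity:
--                     entity_tokens.append(tokens[i])
--                     i += 1
--                 else:
--                     break
--
--             # 如果有实体tokens，添加到结果
--             if entity_tokens and entity_type:
--                 entity_text = "".join(entity_tokens)
--                 results[entity_type].append(entity_text)
--         else:
--             i += 1  # O标签，跳过
--
--     return results
-- ===== SOURCE B (Python) =====
-- from collections import defaultdict
--
-- _LABEL2TYPE = {0: "PERSON", 1: "LOCATION", 2: "ORGANIZATION", 3: "TIME",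
--                4: "PERSON", 5: "LOCATION", 6: "ORGANIZATION", 7: "TIME"}
--
-- def _runs(pairs):
--     """Divide and conquer: run-length-encode (label, token) pairs into maximal
--     (entity_type, text) runs; halves are decoded independently and merged by
--     joining the boundary runs when they carry the same type."""
--     if len(pairs) <= 1:
--         return [(_LABEL2TYPE.get(label), token) for label, token in pairs]
--     mid = len(pairs) // 2
--     left, right = _runs(pairs[:mid]), _runs(pairs[mid:])
--     if left and right and left[-1][0] == right[0][0]:
--         return left[:-1] + [(left[-1][0], left[-1][1] + right[0][1])] + right[1:]
--     return left + right
--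
-- def decode_entities(tokens, labels):
--     """
--     从对齐的tokens和labels解码实体
--     """
--     results = defaultdict(list)
--     for entity_type, text in _runs(list(zip(labels, tokens))):
--         if entity_type is not None:
--             results[entity_type].append(text)
--     return results
-- ===== Notes on version B (the rewrite author's own statement) =====
-- stated objective: alternative
-- what changed: Replaced A's index-driven nested while-loops by a divide-and-conquer run-length encoding: the (label,token) pair list is split in half, each half is decoded into maximal (type,text) runs independently, the two run lists are merged by joining the boundary runs when they share a type, and the dict is built from the final run list; Pre_ excludes only inputs where A raises IndexError (entity label at a position past the tokens list) or loops forever (negative label).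
import Mathlib
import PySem

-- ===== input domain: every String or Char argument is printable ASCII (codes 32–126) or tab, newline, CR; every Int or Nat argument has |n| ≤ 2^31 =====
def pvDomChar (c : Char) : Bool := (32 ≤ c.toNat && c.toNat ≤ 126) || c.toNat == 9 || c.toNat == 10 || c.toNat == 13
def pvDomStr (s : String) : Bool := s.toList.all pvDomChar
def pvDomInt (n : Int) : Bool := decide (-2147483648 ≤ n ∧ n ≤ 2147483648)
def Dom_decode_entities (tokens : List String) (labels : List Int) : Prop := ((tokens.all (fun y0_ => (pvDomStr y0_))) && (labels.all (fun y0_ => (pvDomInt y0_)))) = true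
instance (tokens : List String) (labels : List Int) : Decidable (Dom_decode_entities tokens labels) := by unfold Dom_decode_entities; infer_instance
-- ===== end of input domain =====

-- B replaces A's index-driven nested while-loops by divide-and-conquer run-length encoding:
-- halves of the (label, token) pair list are decoded into (type, text) runs independently and
-- merged by joining equal-typed boundary runs; objective: alternative. A = B on Pre_.

-- ===== PORT A =====
-- inner `while i < len(labels)` loop of A: collects entity tokens, returns (entity_tokens, new i)
def decodeInner (tokens : List String) (labels : List Int) (entity_type : String)
    (i : Nat) (entity_tokens : List String) : List String × Nat :=
  if h : i < labels.length then
    let current_label := labels[i]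
    let is_same_entity :=
      (current_label == 0 && entity_type == "PERSON") ||
      (current_label == 1 && entity_type == "LOCATION") ||
      (current_label == 2 && entity_type == "ORGANIZATION") ||
      (current_label == 3 && entity_type == "TIME") ||
      (current_label == 4 && entity_type == "PERSON") ||
      (current_label == 5 && entity_type == "LOCATION") ||
      (current_label == 6 && entity_type == "ORGANIZATION") ||
      (current_label == 7 && entity_type == "TIME")
    if is_same_entity then
      decodeInner tokens labels entity_type (i + 1)
        (entity_tokens ++ [(PySem.List.pyGet? tokens (i : Int)).getD ""])
    else (entity_tokens, i)
  else (entity_tokens, i)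
termination_by labels.length - i

-- outer `while i < len(labels)` loop of A; the fuel only makes the loop total in Lean: on Pre_
-- every outer iteration advances i by at least 1, so labels.length + 1 iterations always suffice
def decodeOuter (tokens : List String) (labels : List Int) :
    Nat → Nat → PySem.Dict String (List String) → PySem.Dict String (List String)
  | 0, _, results => results
  | fuel + 1, i, results =>
    if _h : i < labels.length then
      let label := labels[i]
      if label < 8 then
        let entity_type :=
          if label == 0 || label == 4 then "PERSON"
          else if label == 1 || label == 5 then "LOCATION"
          else if label == 2 || label == 6 then "ORGANIZATION"
          else if label == 3 || label == 7 then "TIME"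
          else ""
        let p := decodeInner tokens labels entity_type i []
        let results' :=
          if p.1 ≠ [] ∧ entity_type ≠ "" then
            results.insert entity_type (results.getD entity_type [] ++ [PySem.Str.join "" p.1])
          else results
        decodeOuter tokens labels fuel p.2 results'
      else
        decodeOuter tokens labels fuel (i + 1) results
    else results

def decode_entities (tokens : List String) (labels : List Int) : List (String × List String) :=
  (decodeOuter tokens labels (labels.length + 1) 0 PySem.Dict.empty).items

-- ===== PORT B =====
-- _LABEL2TYPE.get(label)
def typeOfLabel (label : Int) : Option String :=
  (PySem.Dict.mk [((0 : Int), "PERSON"), (1, "LOCATION"), (2, "ORGANIZATION"), (3, "TIME"),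
                  (4, "PERSON"), (5, "LOCATION"), (6, "ORGANIZATION"), (7, "TIME")]).get? label

-- `if left and right and left[-1][0] == right[0][0]: left[:-1] + [joined] + right[1:] else left + right`
def mergeRuns (L R : List (Option String × String)) : List (Option String × String) :=
  match L.getLast?, R with
  | some p, q :: rt => if p.1 == q.1 then L.dropLast ++ [(p.1, p.2 ++ q.2)] ++ rt else L ++ R
  | _, _ => L ++ R

-- `_runs(pairs)`: divide-and-conquer run-length encoding of (label, token) pairs
def runsDC (pairs : List (Int × String)) : List (Option String × String) :=
  if pairs.length ≤ 1 then pairs.map (fun p => (typeOfLabel p.1, p.2))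
  else
    mergeRuns (runsDC (pairs.take (pairs.length / 2))) (runsDC (pairs.drop (pairs.length / 2)))
termination_by pairs.length
decreasing_by
  · simp only [List.length_take]; omega
  · simp only [List.length_drop]; omega

-- loop body: `if entity_type is not None: results[entity_type].append(text)`
def runStep2 (results : PySem.Dict String (List String)) (r : Option String × String) :
    PySem.Dict String (List String) :=
  match r.1 with
  | some t => results.insert t (results.getD t [] ++ [r.2])
  | none => results

def decode_entities_alt (tokens : List String) (labels : List Int) : List (String × List String) :=
  ((runsDC (labels.zip tokens)).foldl runStep2 PySem.Dict.empty).items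

-- ===== PRECONDITION & SPEC =====
-- Pre_ excludes exactly the inputs on which A does not return: a negative label makes A's outer
-- loop spin forever (label < 8 but never collected), and an entity label (0..7) at a position
-- past the end of tokens makes A raise IndexError on tokens[i].
def Pre_decode_entities (tokens : List String) (labels : List Int) : Prop :=
  ∀ i < labels.length, 0 ≤ labels.getD i 0 ∧ (labels.getD i 0 < 8 → i < tokens.length)
instance (tokens : List String) (labels : List Int) : Decidable (Pre_decode_entities tokens labels) := by
  unfold Pre_decode_entities; infer_instance

def pvWitness_decode_entities : List String × List Int :=
  (["Jo", "hn", " ", "Par", "is"], [0, 4, 8, 1, 5])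

def Spec_decode_entities (tokens : List String) (labels : List Int) (out : List (String × List String)) : Prop := out = decode_entities_alt tokens labels
instance (tokens : List String) (labels : List Int) (out : List (String × List String)) : Decidable (Spec_decode_entities tokens labels out) := by unfold Spec_decode_entities; infer_instance

-- ===== CLAIM (what is proved, stated in full; the proofs are below) =====
def Claim_equal_decode_entities : Prop := ∀ (tokens : List String) (labels : List Int), Dom_decode_entities tokens labels → Pre_decode_entities tokens labels → Spec_decode_entities tokens labels (decode_entities tokens labels)

-- ===== LEMMAS AND PROOFS =====

-- "".join concatenates
lemma join_empty_nil : PySem.Str.join "" [] = "" := by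
  rw [← String.toList_inj]
  simp [PySem.Chars.join, List.intercalate]

lemma join_empty_singleton (a : String) : PySem.Str.join "" [a] = a := by
  rw [← String.toList_inj]
  simp [PySem.Chars.join, List.intercalate]

lemma join_empty_cons (a : String) (l : List String) :
    PySem.Str.join "" (a :: l) = a ++ PySem.Str.join "" l := by
  rw [← String.toList_inj]
  cases l with
  | nil => simp [PySem.Chars.join, List.intercalate]
  | cons b l => simp [PySem.Chars.join_cons_cons]

-- proof-side canonical recursion for A: skip a None-typed pair, or consume one maximal run
def specFold : List (Option String × String) → PySem.Dict String (List String) → PySem.Dict String (List String)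
  | [], d => d
  | (none, _) :: rest, d => specFold rest d
  | (some t, tok) :: rest, d =>
    specFold (rest.dropWhile (fun q => q.1 == some t))
      (d.insert t (d.getD t [] ++
        [PySem.Str.join "" (tok :: (rest.takeWhile (fun q => q.1 == some t)).map (·.2))]))
termination_by l _ => l.length
decreasing_by
  · exact Nat.lt_succ_of_le (Nat.le_refl _)
  · exact Nat.lt_succ_of_le (List.length_dropWhile_le _ _)

-- proof-side canonical run-length encodings
def consRun (p : Option String × String) : List (Option String × String) → List (Option String × String)
  | [] => [p]
  | q :: rs => if q.1 == p.1 then (p.1, p.2 ++ q.2) :: rs else p :: q :: rs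

def rle : List (Option String × String) → List (Option String × String)
  | [] => []
  | p :: l => consRun p (rle l)

def rleSpec : List (Option String × String) → List (Option String × String)
  | [] => []
  | p :: rest =>
    (p.1, PySem.Str.join "" ((p :: rest.takeWhile (fun q => q.1 == p.1)).map (·.2))) ::
      rleSpec (rest.dropWhile (fun q => q.1 == p.1))
termination_by l => l.length
decreasing_by exact Nat.lt_succ_of_le (List.length_dropWhile_le _ _)

def auxMerge : List (Option String × String) → List (Option String × String) → List (Option String × String)
  | [], R => R
  | [p], R => consRun p R
  | p :: q :: L, R => p :: auxMerge (q :: L) R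

lemma typeOfLabel_eq_none (l : Int) (h0 : l ≠ 0) (h1 : l ≠ 1) (h2 : l ≠ 2) (h3 : l ≠ 3)
    (h4 : l ≠ 4) (h5 : l ≠ 5) (h6 : l ≠ 6) (h7 : l ≠ 7) : typeOfLabel l = none := by
  simp only [typeOfLabel, PySem.Dict.get?_mk_cons, beq_iff_eq]
  rw [if_neg (by omega), if_neg (by omega), if_neg (by omega), if_neg (by omega),
      if_neg (by omega), if_neg (by omega), if_neg (by omega), if_neg (by omega)]
  rfl

lemma same_entity_eq (cur : Int) (etype : String) :
    ((cur == 0 && etype == "PERSON") ||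
     (cur == 1 && etype == "LOCATION") ||
     (cur == 2 && etype == "ORGANIZATION") ||
     (cur == 3 && etype == "TIME") ||
     (cur == 4 && etype == "PERSON") ||
     (cur == 5 && etype == "LOCATION") ||
     (cur == 6 && etype == "ORGANIZATION") ||
     (cur == 7 && etype == "TIME")) = (typeOfLabel cur == some etype) := by
  rw [Bool.eq_iff_iff]
  by_cases h0 : cur = 0
  · subst h0; rw [show typeOfLabel 0 = some "PERSON" by rfl]
    simp only [Bool.or_eq_true, Bool.and_eq_true, beq_iff_eq, Option.some.injEq]
    norm_num; exact eq_comm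
  by_cases h1 : cur = 1
  · subst h1; rw [show typeOfLabel 1 = some "LOCATION" by rfl]
    simp only [Bool.or_eq_true, Bool.and_eq_true, beq_iff_eq, Option.some.injEq]
    norm_num; exact eq_comm
  by_cases h2 : cur = 2
  · subst h2; rw [show typeOfLabel 2 = some "ORGANIZATION" by rfl]
    simp only [Bool.or_eq_true, Bool.and_eq_true, beq_iff_eq, Option.some.injEq]
    norm_num; exact eq_comm
  by_cases h3 : cur = 3
  · subst h3; rw [show typeOfLabel 3 = some "TIME" by rfl]
    simp only [Bool.or_eq_true, Bool.and_eq_true, beq_iff_eq, Option.some.injEq]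
    norm_num; exact eq_comm
  by_cases h4 : cur = 4
  · subst h4; rw [show typeOfLabel 4 = some "PERSON" by rfl]
    simp only [Bool.or_eq_true, Bool.and_eq_true, beq_iff_eq, Option.some.injEq]
    norm_num; exact eq_comm
  by_cases h5 : cur = 5
  · subst h5; rw [show typeOfLabel 5 = some "LOCATION" by rfl]
    simp only [Bool.or_eq_true, Bool.and_eq_true, beq_iff_eq, Option.some.injEq]
    norm_num; exact eq_comm
  by_cases h6 : cur = 6
  · subst h6; rw [show typeOfLabel 6 = some "ORGANIZATION" by rfl]
    simp only [Bool.or_eq_true, Bool.and_eq_true, beq_iff_eq, Option.some.injEq]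
    norm_num; exact eq_comm
  by_cases h7 : cur = 7
  · subst h7; rw [show typeOfLabel 7 = some "TIME" by rfl]
    simp only [Bool.or_eq_true, Bool.and_eq_true, beq_iff_eq, Option.some.injEq]
    norm_num; exact eq_comm
  · rw [typeOfLabel_eq_none cur h0 h1 h2 h3 h4 h5 h6 h7]
    simp only [Bool.or_eq_true, Bool.and_eq_true, beq_iff_eq]
    constructor
    · rintro (⟨h,_⟩|⟨h,_⟩|⟨h,_⟩|⟨h,_⟩|⟨h,_⟩|⟨h,_⟩|⟨h,_⟩|⟨h,_⟩) <;> omega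
    · intro h; exact absurd h (by simp)

lemma etype_typeOf (label : Int) (hl : 0 ≤ label) (hr : label < 8) :
    typeOfLabel label = some
      (if label == 0 || label == 4 then "PERSON"
       else if label == 1 || label == 5 then "LOCATION"
       else if label == 2 || label == 6 then "ORGANIZATION"
       else if label == 3 || label == 7 then "TIME"
       else "") := by
  interval_cases label <;> decide

lemma etype_ne (label : Int) (hl : 0 ≤ label) (hr : label < 8) :
    (if label == 0 || label == 4 then "PERSON"
     else if label == 1 || label == 5 then "LOCATION"
     else if label == 2 || label == 6 then "ORGANIZATION"
     else if label == 3 || label == 7 then "TIME"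
     else "") ≠ "" := by
  interval_cases label <;> decide

lemma specFold_dropWhile_none :
    ∀ (l : List (Option String × String)) (d : PySem.Dict String (List String)),
      specFold (l.dropWhile (fun q => q.1 == (none : Option String))) d = specFold l d := by
  intro l
  induction l with
  | nil => intro d; simp [List.dropWhile]
  | cons y l ih =>
    intro d
    obtain ⟨a, tok⟩ := y
    cases a with
    | none => simp only [List.dropWhile]; simpa [specFold] using ih d
    | some t => simp [List.dropWhile, specFold]

lemma decodeInner_eq (tokens : List String) (labels : List Int)
    (hPre : Pre_decode_entities tokens labels) :
    ∀ (n i : Nat) (acc : List String) (etype : String), labels.length - i = n →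
      decodeInner tokens labels etype i acc =
        (acc ++ ((((labels.map typeOfLabel).zip tokens).drop i).takeWhile
            (fun q => q.1 == some etype)).map (·.2),
         i + ((((labels.map typeOfLabel).zip tokens).drop i).takeWhile
            (fun q => q.1 == some etype)).length) := by
  intro n
  induction n with
  | zero =>
    intro i acc etype hn
    have hge : labels.length ≤ i := by omega
    have hdrop : ((labels.map typeOfLabel).zip tokens).drop i = [] := by
      apply List.drop_eq_nil_of_le
      simp [List.length_zip]; omega
    rw [decodeInner, dif_neg (by omega), hdrop]
    simp
  | succ n ih =>
    intro i acc etype hn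
    have hi : i < labels.length := by omega
    rw [decodeInner, dif_pos hi]
    simp only [same_entity_eq]
    by_cases htok : i < tokens.length
    · have hiP : i < ((labels.map typeOfLabel).zip tokens).length := by
        simp [List.length_zip]; omega
      have hdrop : ((labels.map typeOfLabel).zip tokens).drop i =
          ((labels.map typeOfLabel).zip tokens)[i] :: ((labels.map typeOfLabel).zip tokens).drop (i+1) :=
        List.drop_eq_getElem_cons hiP
      have hget : ((labels.map typeOfLabel).zip tokens)[i] = (typeOfLabel labels[i], tokens[i]) := by
        rw [List.getElem_zip]
        simp
      by_cases hsame : (typeOfLabel labels[i] == some etype) = true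
      · rw [if_pos hsame]
        have hpy : (PySem.List.pyGet? tokens (i : Int)).getD "" = tokens[i] := by
          simp [PySem.List.pyGet?_natCast, List.getElem?_eq_getElem htok]
        rw [hpy, ih (i+1) _ etype (by omega)]
        rw [hdrop, hget, List.takeWhile_cons, if_pos hsame]
        simp [List.append_assoc]
        omega
      · rw [if_neg hsame]
        rw [hdrop, hget, List.takeWhile_cons, if_neg hsame]
        simp
    · -- i past tokens: Pre forces labels[i] ≥ 8, so the type is none and the test is false
      have h8 : ¬ labels[i] < 8 := by
        intro hlt
        have := (hPre i hi).2
        rw [List.getD_eq_getElem _ _ hi] at this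
        exact htok (this hlt)
      have hnone : typeOfLabel labels[i] = none := by
        apply typeOfLabel_eq_none <;> omega
      have hfalse : (typeOfLabel labels[i] == some etype) = false := by
        rw [hnone]; rfl
      rw [hfalse]
      simp only [Bool.false_eq_true, if_false]
      have hdrop : ((labels.map typeOfLabel).zip tokens).drop i = [] := by
        apply List.drop_eq_nil_of_le
        simp [List.length_zip]; omega
      rw [hdrop]; simp

lemma drop_length_takeWhile (p : (Option String × String) → Bool)
    (l : List (Option String × String)) :
    l.drop (l.takeWhile p).length = l.dropWhile p := by
  induction l with
  | nil => rfl
  | cons x xs ih =>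
    by_cases h : p x
    · simp [h, ih]
    · simp [h]

lemma decodeOuter_eq (tokens : List String) (labels : List Int)
    (hPre : Pre_decode_entities tokens labels) :
    ∀ (fuel i : Nat) (d : PySem.Dict String (List String)), labels.length - i < fuel →
      decodeOuter tokens labels fuel i d =
        specFold (((labels.map typeOfLabel).zip tokens).drop i) d := by
  intro fuel
  induction fuel with
  | zero => intro i d h; omega
  | succ fuel ih =>
    intro i d hf
    by_cases hi : i < labels.length
    · rw [decodeOuter, dif_pos hi]
      have hPi := hPre i hi
      rw [List.getD_eq_getElem _ _ hi] at hPi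
      by_cases hl : labels[i] < 8
      · have htok : i < tokens.length := hPi.2 hl
        have hiP : i < ((labels.map typeOfLabel).zip tokens).length := by
          simp [List.length_zip]; omega
        have hdrop : ((labels.map typeOfLabel).zip tokens).drop i =
            ((labels.map typeOfLabel).zip tokens)[i] :: ((labels.map typeOfLabel).zip tokens).drop (i+1) :=
          List.drop_eq_getElem_cons hiP
        have hget : ((labels.map typeOfLabel).zip tokens)[i] = (typeOfLabel labels[i], tokens[i]) := by
          rw [List.getElem_zip]; simp
        rw [if_pos hl]
        have hty := etype_typeOf labels[i] hPi.1 hl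
        have hne := etype_ne labels[i] hPi.1 hl
        set et :=
          (if labels[i] == 0 || labels[i] == 4 then "PERSON"
           else if labels[i] == 1 || labels[i] == 5 then "LOCATION"
           else if labels[i] == 2 || labels[i] == 6 then "ORGANIZATION"
           else if labels[i] == 3 || labels[i] == 7 then "TIME"
           else "") with het
        have hinner := decodeInner_eq tokens labels hPre (labels.length - i) i [] et rfl
        have hsame : ((typeOfLabel labels[i] : Option String) == some et) = true := by
          rw [hty]; simp
        have htw : (((labels.map typeOfLabel).zip tokens).drop i).takeWhile
            (fun q => q.1 == some et) =
            (typeOfLabel labels[i], tokens[i]) ::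
              (((labels.map typeOfLabel).zip tokens).drop (i+1)).takeWhile (fun q => q.1 == some et) := by
          rw [hdrop, hget, List.takeWhile_cons, if_pos hsame]
        dsimp only []
        rw [hinner]
        simp only [htw, List.map_cons, List.length_cons, List.nil_append]
        have hnonempty : (tokens[i] ::
            ((((labels.map typeOfLabel).zip tokens).drop (i+1)).takeWhile
              (fun q => q.1 == some et)).map (·.2)) ≠ [] := by simp
        rw [if_pos ⟨hnonempty, hne⟩]
        set k := ((((labels.map typeOfLabel).zip tokens).drop (i+1)).takeWhile
            (fun q => q.1 == some et)).length with hk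
        rw [ih (i + (k + 1)) _ (by omega)]
        -- rewrite the RHS one step
        have hget' : ((labels.map typeOfLabel).zip tokens)[i] = (some et, tokens[i]) := by
          rw [hget, hty]
        rw [hdrop, hget', specFold]
        congr 1
        · -- list argument: drop (i + (k+1)) = dropWhile over drop (i+1)
          have h1 : ((labels.map typeOfLabel).zip tokens).drop (i + (k + 1)) =
              (((labels.map typeOfLabel).zip tokens).drop (i+1)).drop k := by
            rw [List.drop_drop]; congr 1; omega
          rw [h1, hk]
          exact drop_length_takeWhile _ _
      · rw [if_neg hl]
        rw [ih (i+1) d (by omega)]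
        by_cases hiP : i < ((labels.map typeOfLabel).zip tokens).length
        · have hdrop : ((labels.map typeOfLabel).zip tokens).drop i =
              ((labels.map typeOfLabel).zip tokens)[i] :: ((labels.map typeOfLabel).zip tokens).drop (i+1) :=
            List.drop_eq_getElem_cons hiP
          have hget : ((labels.map typeOfLabel).zip tokens)[i] = (typeOfLabel labels[i], tokens[i]'(by simp [List.length_zip] at hiP; omega)) := by
            rw [List.getElem_zip]; simp
          have hnone : typeOfLabel labels[i] = none := by
            apply typeOfLabel_eq_none <;> omega
          rw [hdrop, hget, hnone, specFold]
        · have h1 : ((labels.map typeOfLabel).zip tokens).drop i = [] :=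
            List.drop_eq_nil_of_le (by omega)
          have h2 : ((labels.map typeOfLabel).zip tokens).drop (i+1) = [] :=
            List.drop_eq_nil_of_le (by omega)
          rw [h1, h2]
    · rw [decodeOuter, dif_neg hi]
      have h1 : ((labels.map typeOfLabel).zip tokens).drop i = [] := by
        apply List.drop_eq_nil_of_le
        simp [List.length_zip]; omega
      rw [h1, specFold]

-- ===== B-side lemmas: runsDC computes the canonical RLE =====

lemma consRun_consRun_same (t : Option String) (s s' : String)
    (R : List (Option String × String)) :
    consRun (t, s) (consRun (t, s') R) = consRun (t, s ++ s') R := by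
  cases R with
  | nil => simp [consRun]
  | cons q rs =>
    by_cases h : q.1 = t
    · simp [consRun, h, String.append_assoc]
    · simp [consRun, h]

lemma consRun_head_fst (p : Option String × String) (R : List (Option String × String)) :
    ∃ s' rs, consRun p R = (p.1, s') :: rs := by
  cases R with
  | nil => exact ⟨p.2, [], rfl⟩
  | cons q rs =>
    by_cases h : q.1 = p.1
    · exact ⟨p.2 ++ q.2, rs, by simp [consRun, h]⟩
    · exact ⟨p.2, q :: rs, by simp [consRun, h]⟩

lemma mergeRuns_nil_right (L : List (Option String × String)) : mergeRuns L [] = L ++ [] := by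
  unfold mergeRuns
  cases h : L.getLast? <;> rfl

lemma mergeRuns_cons_right (L rt : List (Option String × String)) (g q : Option String × String)
    (hg : L.getLast? = some g) :
    mergeRuns L (q :: rt) =
      if (g.1 == q.1) = true then L.dropLast ++ [(g.1, g.2 ++ q.2)] ++ rt else L ++ q :: rt := by
  unfold mergeRuns
  rw [hg]

lemma auxMerge_consRun :
    ∀ (L : List (Option String × String)) (p : Option String × String)
      (R : List (Option String × String)),
      auxMerge (consRun p L) R = consRun p (auxMerge L R) := by
  intro L
  induction L with
  | nil => intro p R; rfl
  | cons x L' ih =>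
    intro p R
    obtain ⟨t, s⟩ := x
    by_cases h : t = p.1
    · have hc : consRun p ((t, s) :: L') = (p.1, p.2 ++ s) :: L' := by simp [consRun, h]
      rw [hc]
      cases L' with
      | nil =>
        have hcc := consRun_consRun_same p.1 p.2 s R
        rw [Prod.mk.eta] at hcc
        show consRun (p.1, p.2 ++ s) R = consRun p (auxMerge [(t, s)] R)
        rw [show auxMerge [(t, s)] R = consRun (t, s) R from rfl, h]
        exact hcc.symm
      | cons y L'' =>
        show (p.1, p.2 ++ s) :: auxMerge (y :: L'') R =
          consRun p ((t, s) :: auxMerge (y :: L'') R)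
        simp [consRun, h]
    · have hc : consRun p ((t, s) :: L') = p :: (t, s) :: L' := by simp [consRun, h]
      rw [hc]
      cases L' with
      | nil =>
        obtain ⟨s', rs, hcr⟩ := consRun_head_fst (t, s) R
        show p :: auxMerge [(t, s)] R = consRun p (auxMerge [(t, s)] R)
        rw [show auxMerge [(t, s)] R = consRun (t, s) R from rfl, hcr]
        simp [consRun, h]
      | cons y L'' =>
        show p :: auxMerge ((t, s) :: y :: L'') R = consRun p (auxMerge ((t, s) :: y :: L'') R)
        rw [show auxMerge ((t, s) :: y :: L'') R = (t, s) :: auxMerge (y :: L'') R from rfl]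
        simp [consRun, h]

lemma mergeRuns_eq_auxMerge :
    ∀ (L R : List (Option String × String)), mergeRuns L R = auxMerge L R := by
  intro L
  induction L with
  | nil => intro R; cases R <;> rfl
  | cons p L' ih =>
    intro R
    cases L' with
    | nil =>
      cases R with
      | nil => rfl
      | cons q rt =>
        rw [mergeRuns_cons_right [p] rt p q (by simp)]
        show _ = consRun p (q :: rt)
        by_cases h : p.1 = q.1
        · rw [if_pos (by simp [h])]
          simp [consRun, h]
        · rw [if_neg (by simp [h])]
          have h' : ¬ q.1 = p.1 := fun hq => h hq.symm
          simp [consRun, h']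
    | cons x L'' =>
      have ⟨g, hg⟩ : ∃ g, (x :: L'').getLast? = some g := by
        cases hgl : (x :: L'').getLast? with
        | none => exact absurd hgl (by simp)
        | some g => exact ⟨g, rfl⟩
      have hlast : (p :: x :: L'').getLast? = some g := by
        rw [List.getLast?_cons_cons, hg]
      rw [show auxMerge (p :: x :: L'') R = p :: auxMerge (x :: L'') R from rfl, ← ih R]
      cases R with
      | nil =>
        rw [mergeRuns_nil_right, mergeRuns_nil_right]
        rfl
      | cons q rt =>
        rw [mergeRuns_cons_right _ rt g q hlast, mergeRuns_cons_right _ rt g q hg]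
        by_cases h : g.1 = q.1
        · rw [if_pos (by simp [h]), if_pos (by simp [h])]
          rfl
        · rw [if_neg (by simp [h]), if_neg (by simp [h])]
          rfl

lemma rle_append (u v : List (Option String × String)) :
    rle (u ++ v) = auxMerge (rle u) (rle v) := by
  induction u with
  | nil => simp [rle, auxMerge]
  | cons x u' ih =>
    rw [List.cons_append, rle, ih, rle, auxMerge_consRun]

lemma runsDC_eq_rle :
    ∀ (n : Nat) (pairs : List (Int × String)), pairs.length ≤ n →
      runsDC pairs = rle (pairs.map (fun p => (typeOfLabel p.1, p.2))) := by
  intro n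
  induction n with
  | zero =>
    intro pairs h
    have : pairs = [] := List.eq_nil_of_length_eq_zero (Nat.le_zero.mp h)
    subst this; simp [runsDC, rle]
  | succ n ih =>
    intro pairs h
    by_cases h1 : pairs.length ≤ 1
    · rw [runsDC, if_pos h1]
      match pairs, h1 with
      | [], _ => rfl
      | [p], _ => rfl
    · rw [runsDC, if_neg h1]
      rw [ih _ (by simp only [List.length_take]; omega),
          ih _ (by simp only [List.length_drop]; omega),
          mergeRuns_eq_auxMerge, ← rle_append, ← List.map_append, List.take_append_drop]

lemma rle_eq_rleSpec :
    ∀ (n : Nat) (l : List (Option String × String)), l.length ≤ n → rle l = rleSpec l := by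
  intro n
  induction n with
  | zero =>
    intro l h
    have : l = [] := List.eq_nil_of_length_eq_zero (Nat.le_zero.mp h)
    subst this; rw [rleSpec, rle]
  | succ n ih =>
    intro l h
    match l with
    | [] => rw [rleSpec, rle]
    | (t, s) :: rest =>
      rw [rle, ih rest (by simp at h; omega)]
      cases rest with
      | nil =>
        rw [rleSpec]
        simp [rleSpec, consRun, join_empty_singleton]
      | cons y r2 =>
        obtain ⟨t2, s2⟩ := y
        rw [rleSpec, rleSpec]
        by_cases heq : t2 = t
        · subst heq
          rw [show ((t2, s2) :: r2).takeWhile (fun q => q.1 == t2) =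
                (t2, s2) :: r2.takeWhile (fun q => q.1 == t2) by simp [List.takeWhile_cons],
              show ((t2, s2) :: r2).dropWhile (fun q => q.1 == t2) =
                r2.dropWhile (fun q => q.1 == t2) by simp [List.dropWhile_cons]]
          rw [show consRun (t2, s)
                ((t2, PySem.Str.join "" (((t2, s2) :: r2.takeWhile (fun q => q.1 == t2)).map (·.2))) ::
                  rleSpec (r2.dropWhile (fun q => q.1 == t2))) =
              (t2, s ++ PySem.Str.join "" (((t2, s2) :: r2.takeWhile (fun q => q.1 == t2)).map (·.2))) ::
                  rleSpec (r2.dropWhile (fun q => q.1 == t2)) by simp [consRun]]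
          simp [join_empty_cons]
        · rw [show ((t2, s2) :: r2).takeWhile (fun q => q.1 == t) = [] by
                simp [List.takeWhile_cons, heq],
              show ((t2, s2) :: r2).dropWhile (fun q => q.1 == t) = (t2, s2) :: r2 by
                simp [List.dropWhile_cons, heq]]
          rw [show consRun (t, s)
                ((t2, PySem.Str.join "" (((t2, s2) :: r2.takeWhile (fun q => q.1 == t2)).map (·.2))) ::
                  rleSpec (r2.dropWhile (fun q => q.1 == t2))) =
              (t, s) :: (t2, PySem.Str.join "" (((t2, s2) :: r2.takeWhile (fun q => q.1 == t2)).map (·.2))) ::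
                  rleSpec (r2.dropWhile (fun q => q.1 == t2)) by simp [consRun, heq]]
          rw [rleSpec]
          simp [join_empty_singleton, join_empty_cons, join_empty_nil]

lemma specFold_eq_foldl :
    ∀ (n : Nat) (l : List (Option String × String)) (d : PySem.Dict String (List String)),
      l.length ≤ n → specFold l d = (rleSpec l).foldl runStep2 d := by
  intro n
  induction n with
  | zero =>
    intro l d h
    have : l = [] := List.eq_nil_of_length_eq_zero (Nat.le_zero.mp h)
    subst this; rw [specFold, rleSpec]; rfl
  | succ n ih =>
    intro l d h
    match l with
    | [] => rw [specFold, rleSpec]; rfl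
    | (a, s) :: rest =>
      have hdw : (rest.dropWhile (fun q => q.1 == a)).length ≤ n :=
        le_trans (List.length_dropWhile_le _ _) (by simp at h; omega)
      cases a with
      | none =>
        rw [specFold, rleSpec, List.foldl_cons]
        rw [show runStep2 d ((none : Option String),
              PySem.Str.join "" ((((none : Option String), s) ::
                rest.takeWhile (fun q => q.1 == (none : Option String))).map (·.2))) = d from rfl]
        rw [← ih _ d hdw, specFold_dropWhile_none]
      | some t =>
        rw [specFold, rleSpec, List.foldl_cons]
        rw [show runStep2 d (some t,
              PySem.Str.join "" (((some t, s) :: rest.takeWhile (fun q => q.1 == some t)).map (·.2))) =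
            d.insert t (d.getD t [] ++
              [PySem.Str.join "" (((some t, s) :: rest.takeWhile (fun q => q.1 == some t)).map (·.2))]) from rfl]
        rw [List.map_cons]
        rw [← ih _ _ hdw]

lemma zip_proj (labels : List Int) (tokens : List String) :
    (labels.zip tokens).map (fun p => (typeOfLabel p.1, p.2)) =
      (labels.map typeOfLabel).zip tokens := by
  induction labels generalizing tokens with
  | nil => simp
  | cons l ls ih =>
    cases tokens with
    | nil => simp
    | cons t ts => simp [ih]

-- ===== VERDICT (by name: the statement is the Claim_ definition above) =====
theorem decode_entities_spec : Claim_equal_decode_entities := by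
  intro tokens labels _hDom hPre
  unfold Spec_decode_entities decode_entities decode_entities_alt
  rw [decodeOuter_eq tokens labels hPre (labels.length + 1) 0 _ (by omega), List.drop_zero]
  rw [runsDC_eq_rle (labels.zip tokens).length _ (Nat.le_refl _), zip_proj,
      rle_eq_rleSpec ((labels.map typeOfLabel).zip tokens).length _ (Nat.le_refl _),
      specFold_eq_foldl ((labels.map typeOfLabel).zip tokens).length _ _ (Nat.le_refl _)]
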